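-- pv_equiv track=rewrite | github.com/ken-arf/DISTANT | modules/baselines/modules/autoner/model.py | _extract_span
-- ===== SOURCE A (Python) =====
-- def _extract_span(spans):
--
--     runs = []
--     run_start = spans[0]
--     for i in range(len(spans)-1):
--         if spans[i]+1 != spans[i+1]:
--             # store
--             runs.append([run_start, spans[i]+1])
--             run_start = spans[i+1]
--     runs.append([run_start, spans[-1]+1])
--
--     return runs
-- ===== SOURCE B (Python) =====
-- def _extract_span(spans):
--     # Two staged passes: first collect the boundary indices where consecutivity
--     # breaks, then build each interval from a consecutive pair of boundaries.
--     n = len(spans)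
--     bounds = [0] + [i + 1 for i in range(n - 1) if spans[i] + 1 != spans[i + 1]] + [n]
--     return [[spans[bounds[j]], spans[bounds[j + 1] - 1] + 1] for j in range(len(bounds) - 1)]
-- ===== Notes on version B (the rewrite author's own statement) =====
-- stated objective: alternative
-- what changed: B is a two-stage index-based construction: it first computes the list of boundary indices (zero, every gap position i+1 where spans at i plus one differs from spans at i+1, and the length), then in a separate pass builds each interval from a consecutive pair of boundaries l,r as the pair of spans at l and spans at r-1 plus one, instead of A's single inline scan that tracks run_start and appends intervals as gaps are met.
import Mathlib
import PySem

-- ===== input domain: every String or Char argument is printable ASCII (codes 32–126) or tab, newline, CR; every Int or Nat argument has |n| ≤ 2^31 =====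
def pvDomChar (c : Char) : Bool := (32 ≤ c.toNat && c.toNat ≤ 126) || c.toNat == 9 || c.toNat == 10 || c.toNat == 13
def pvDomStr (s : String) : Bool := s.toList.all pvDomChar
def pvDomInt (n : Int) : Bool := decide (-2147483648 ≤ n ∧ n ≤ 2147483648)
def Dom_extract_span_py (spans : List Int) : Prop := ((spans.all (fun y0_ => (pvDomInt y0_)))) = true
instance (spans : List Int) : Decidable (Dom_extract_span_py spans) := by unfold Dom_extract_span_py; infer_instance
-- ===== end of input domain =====

-- B builds the result in two staged passes — boundary indices first, then intervals
-- from consecutive boundary pairs — instead of A's single inline scan (alternative decomposition; same cost).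

-- ===== PORT A =====
def extract_span_py (spans : List Int) : List (List Int) :=
  let run_start := PySem.List.pyGetD spans 0 0
  let st := (PySem.List.pyRange 0 ((spans.length : Int) - 1) 1).foldl
    (fun (st : List (List Int) × Int) i =>
      if PySem.List.pyGetD spans i 0 + 1 ≠ PySem.List.pyGetD spans (i + 1) 0 then
        (st.1 ++ [[st.2, PySem.List.pyGetD spans i 0 + 1]], PySem.List.pyGetD spans (i + 1) 0)
      else st)
    ([], run_start)
  st.1 ++ [[st.2, PySem.List.pyGetD spans (-1) 0 + 1]]

-- ===== PORT B =====
def extract_span_py_alt (spans : List Int) : List (List Int) :=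
  let n : Int := (spans.length : Int)
  let bounds : List Int :=
    [0] ++ ((PySem.List.pyRange 0 (n - 1) 1).filter
        (fun i => decide (PySem.List.pyGetD spans i 0 + 1 ≠ PySem.List.pyGetD spans (i + 1) 0))).map (· + 1)
      ++ [n]
  (PySem.List.pyRange 0 ((bounds.length : Int) - 1) 1).map
    (fun j => [PySem.List.pyGetD spans (PySem.List.pyGetD bounds j 0) 0,
               PySem.List.pyGetD spans (PySem.List.pyGetD bounds (j + 1) 0 - 1) 0 + 1])

-- ===== PRECONDITION & SPEC =====
-- Pre_ excludes only the empty list, on which Python A raises IndexError reading the first element.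
def Pre_extract_span_py (spans : List Int) : Prop := spans ≠ []
instance (spans : List Int) : Decidable (Pre_extract_span_py spans) := by
  unfold Pre_extract_span_py; infer_instance
def pvWitness_extract_span_py : List Int := [1, 2, 5]

def Spec_extract_span_py (spans : List Int) (out : List (List Int)) : Prop := out = extract_span_py_alt spans
instance (spans : List Int) (out : List (List Int)) : Decidable (Spec_extract_span_py spans out) := by unfold Spec_extract_span_py; infer_instance

-- ===== CLAIM (what is proved, stated in full; the proofs are below) =====
def Claim_equal_extract_span_py : Prop := ∀ (spans : List Int), Dom_extract_span_py spans → Pre_extract_span_py spans → Spec_extract_span_py spans (extract_span_py spans)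

-- ===== LEMMAS AND PROOFS =====

-- reference: the runs of consecutive values of a nonempty list, starting a run at rs
def specRuns (rs : Int) : List Int → List (List Int)
  | [] => [[rs, rs + 1]]          -- unreachable for the ports (they only call it on nonempty lists)
  | [a] => [[rs, a + 1]]
  | a :: b :: t => if a + 1 ≠ b then [rs, a + 1] :: specRuns b (b :: t) else specRuns rs (b :: t)

-- getLast with a proof equals getLastD 0 on a nonempty list
theorem pv_getLast_eq_getLastD (l : List Int) (h : l ≠ []) : l.getLast h = l.getLastD 0 := by
  induction l with
  | nil => contradiction
  | cons a l ih =>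
    cases l with
    | nil => rfl
    | cons b m => simp [List.getLast, List.getLastD]

-- A's index loop over range(len-1) equals the fold over adjacent pairs (prefix version)
theorem a_fold_take (xs : List Int) (g : (List (List Int) × Int) → Int → Int → (List (List Int) × Int))
    (init : List (List Int) × Int) (m : Nat) (hm : m ≤ (xs.zip xs.tail).length) :
    (PySem.List.pyRange 0 (m : Int) 1).foldl
      (fun st i => g st (PySem.List.pyGetD xs i 0) (PySem.List.pyGetD xs (i + 1) 0)) init
    = ((xs.zip xs.tail).take m).foldl (fun st p => g st p.1 p.2) init := by
  induction m with
  | zero => simp [PySem.List.pyRange_one_eq_nil]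
  | succ k ih =>
    have hk : k ≤ (xs.zip xs.tail).length := Nat.le_of_succ_le hm
    have hklt : k < (xs.zip xs.tail).length := hm
    have hlen : (xs.zip xs.tail).length = xs.length - 1 := by
      simp [List.length_zip, List.length_tail]
    have hx : k < xs.length := by omega
    have hx1 : k + 1 < xs.length := by
      have : k < xs.length - 1 := by omega
      omega
    have hcast : ((k + 1 : Nat) : Int) = (k : Int) + 1 := by push_cast; ring
    rw [hcast, PySem.List.pyRange_one_succ_right (Int.natCast_nonneg k)]
    rw [List.foldl_append, ih hk]
    have htake : (xs.zip xs.tail).take (k + 1)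
        = (xs.zip xs.tail).take k ++ [(xs.zip xs.tail)[k]] := by
      rw [List.take_add_one, List.getElem?_eq_getElem hklt]; rfl
    rw [htake, List.foldl_append]
    simp only [List.foldl_cons, List.foldl_nil]
    have hz : (xs.zip xs.tail)[k] = (xs[k], xs.tail[k]'(by simp [List.length_tail]; omega)) := by
      simp [List.getElem_zip]
    have ht : xs.tail[k]'(by simp [List.length_tail]; omega) = xs[k+1] := by
      simp [List.getElem_tail]
    have h1 : PySem.List.pyGetD xs ((k : Int)) 0 = xs[k] := by
      rw [PySem.List.pyGetD_natCast]
      exact List.getD_eq_getElem xs 0 hx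
    have h2 : PySem.List.pyGetD xs ((k : Int) + 1) 0 = xs[k+1] := by
      rw [show ((k : Int) + 1) = ((k + 1 : Nat) : Int) by push_cast; ring,
        PySem.List.pyGetD_natCast]
      exact List.getD_eq_getElem xs 0 hx1
    simp [hz, ht, h1, h2]

-- A's loop + final append produce exactly the runs of a nonempty list
theorem a_loop_spec (t : List Int) : ∀ (a : Int) (runs : List (List Int)) (rs : Int),
    (let st := ((a :: t).zip t).foldl
        (fun (st : List (List Int) × Int) p =>
          if p.1 + 1 ≠ p.2 then (st.1 ++ [[st.2, p.1 + 1]], p.2) else st) (runs, rs)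
     st.1 ++ [[st.2, (a :: t).getLastD 0 + 1]]) = runs ++ specRuns rs (a :: t) := by
  induction t with
  | nil => intro a runs rs; simp [specRuns]
  | cons b t' ih =>
    intro a runs rs
    simp only [List.zip_cons_cons, List.foldl_cons]
    by_cases h : a + 1 ≠ b
    · simp only [if_pos h]
      rw [show (a :: b :: t').getLastD 0 = (b :: t').getLastD 0 from rfl]
      have := ih b (runs ++ [[rs, a + 1]]) b
      simp only at this
      rw [this, specRuns, if_pos h, List.append_assoc]
      rfl
    · simp only [if_neg h]
      rw [show (a :: b :: t').getLastD 0 = (b :: t').getLastD 0 from rfl]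
      have := ih b runs rs
      simp only at this
      rw [this, specRuns, if_neg h]

-- A equals the reference on a nonempty list
theorem a_eq_spec (s : Int) (t : List Int) :
    extract_span_py (s :: t) = specRuns s (s :: t) := by
  simp only [extract_span_py]
  have hlen : (((s :: t).length : Int) - 1) = (((s :: t).zip t).length : Int) := by
    simp [List.length_zip]
  have hz : (s :: t).zip (s :: t).tail = (s :: t).zip t := rfl
  rw [hlen,
    a_fold_take (s :: t)
      (fun st x y => if x + 1 ≠ y then (st.1 ++ [[st.2, x + 1]], y) else st)
      ([], PySem.List.pyGetD (s :: t) 0 0) _ (by rw [hz])]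
  rw [hz, List.take_length]
  have hlast : PySem.List.pyGetD (s :: t) (-1) 0 = (s :: t).getLastD 0 := by
    rw [PySem.List.pyGetD_neg_one (s :: t) 0 (by simp), pv_getLast_eq_getLastD _ (by simp)]
  rw [hlast]
  have := a_loop_spec t s [] (PySem.List.pyGetD (s :: t) 0 0)
  simp only at this
  rw [this]
  simp [PySem.List.pyGetD_zero_cons]

-- ===== B-side proof machinery (Nat-level view of B's two passes) =====

-- B's first pass, on the Nat level: the inner boundary indices
def pvCuts (xs : List Int) : List Nat :=
  ((List.range (xs.length - 1)).filter
    (fun i => decide (xs.getD i 0 + 1 ≠ xs.getD (i + 1) 0))).map (· + 1)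

-- B's second pass, on the Nat level: intervals from consecutive boundary pairs
def pvPairs (xs : List Int) (l : List Nat) : List (List Int) :=
  (l.zip l.tail).map (fun p => [xs.getD p.1 0, xs.getD (p.2 - 1) 0 + 1])

theorem pvRange_map {α : Type} (m : Nat) (f : Int → α) :
    (PySem.List.pyRange 0 (m : Int) 1).map f = (List.range m).map (fun i : Nat => f (i : Int)) := by
  have h0 : (fun k : Nat => (0:Int) + (k:Int)) = (fun k : Nat => (k:Int)) := by
    funext k; simp
  rw [PySem.List.pyRange_one, h0]
  simp only [sub_zero, Int.toNat_natCast, List.map_map]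
  apply List.map_congr_left
  intro i _
  simp

theorem pvRange_filter (m : Nat) (p : Int → Bool) :
    (PySem.List.pyRange 0 (m : Int) 1).filter p
      = ((List.range m).filter (fun i : Nat => p (i : Int))).map (fun i : Nat => (i : Int)) := by
  have h0 : (fun k : Nat => (0:Int) + (k:Int)) = (fun k : Nat => (k:Int)) := by
    funext k; simp
  rw [PySem.List.pyRange_one, h0, List.filter_map]
  simp only [sub_zero, Int.toNat_natCast]
  rfl

theorem pvCuts_ge_one (xs : List Int) : ∀ x ∈ pvCuts xs, 1 ≤ x := by
  intro x hx
  unfold pvCuts at hx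
  obtain ⟨i, _, rfl⟩ := List.mem_map.mp hx
  omega

-- index-based pair map over a list equals the map over adjacent pairs
theorem range_pairs {α : Type} (g : Nat → Nat → α) (l : List Nat) :
    (List.range (l.length - 1)).map (fun j => g (l.getD j 0) (l.getD (j + 1) 0))
      = (l.zip l.tail).map (fun p => g p.1 p.2) := by
  induction l with
  | nil => rfl
  | cons a l _ =>
    cases l with
    | nil => rfl
    | cons b t =>
      have hl : (a :: b :: t).length - 1 = t.length + 1 := by simp
      rw [hl, List.range_succ_eq_map]
      simp only [List.map_cons, List.map_map, List.zip_cons_cons, List.tail_cons]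
      congr 1

-- shifting every boundary by one steps the carrier list down by one element
theorem pairs_shift (a : Int) (tl : List Int) (l : List Nat) (h : ∀ y ∈ l.tail, 1 ≤ y) :
    pvPairs (a :: tl) (l.map (· + 1)) = pvPairs tl l := by
  unfold pvPairs
  have htail : (l.map (· + 1)).tail = l.tail.map (· + 1) := by
    cases l <;> simp
  rw [htail, List.zip_map, List.map_map]
  apply List.map_congr_left
  intro p hp
  have h2 : p.2 ∈ l.tail := (List.of_mem_zip hp).2
  have h1 : 1 ≤ p.2 := h p.2 h2
  obtain ⟨k, hk⟩ : ∃ k, p.2 = k + 1 := ⟨p.2 - 1, by omega⟩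
  simp [hk, List.getD_cons_succ]

-- the boundary list of a two-element-headed list, recursively
theorem pvCuts_cons (a b : Int) (t : List Int) :
    pvCuts (a :: b :: t)
      = (if a + 1 ≠ b then [1] else []) ++ (pvCuts (b :: t)).map (· + 1) := by
  unfold pvCuts
  have h1 : (a :: b :: t).length - 1 = t.length + 1 := by simp
  have h2 : (b :: t).length - 1 = t.length := by simp
  rw [h1, h2, List.range_succ_eq_map, List.filter_cons, List.filter_map]
  have hfil : List.filter
        ((fun i => decide ((a :: b :: t).getD i 0 + 1 ≠ (a :: b :: t).getD (i + 1) 0)) ∘ Nat.succ)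
        (List.range t.length)
      = List.filter (fun i => decide ((b :: t).getD i 0 + 1 ≠ (b :: t).getD (i + 1) 0))
        (List.range t.length) := by
    apply List.filter_congr
    intro i _
    simp [Function.comp, List.getD_cons_succ]
  by_cases hab : a + 1 ≠ b
  · rw [if_pos (by simpa using hab), hfil]
    simp [Function.comp, hab]
  · rw [if_neg (by simpa using hab), hfil]
    simp [Function.comp, hab]

-- the first halves of specRuns rs differ from specRuns rs' only in the start value
theorem specRuns_start (rs rs' a : Int) (t : List Int) :
    ∃ e r, specRuns rs (a :: t) = [rs, e] :: r ∧ specRuns rs' (a :: t) = [rs', e] :: r := by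
  induction t generalizing rs rs' a with
  | nil => exact ⟨a + 1, [], by simp [specRuns], by simp [specRuns]⟩
  | cons b t' ih =>
    by_cases h : a + 1 ≠ b
    · exact ⟨a + 1, specRuns b (b :: t'),
        by rw [specRuns, if_pos h], by rw [specRuns, if_pos h]⟩
    · obtain ⟨e, r, h1, h2⟩ := ih rs rs' b
      exact ⟨e, r, by rw [specRuns, if_neg h]; exact h1, by rw [specRuns, if_neg h]; exact h2⟩

-- B's two passes produce exactly the runs of a nonempty list
theorem pairs_eq_specRuns (xs : List Int) (h : xs ≠ []) :
    pvPairs xs (0 :: pvCuts xs ++ [xs.length]) = specRuns (xs.getD 0 0) xs := by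
  induction xs with
  | nil => contradiction
  | cons a tl ih =>
    cases tl with
    | nil => simp [pvPairs, pvCuts, specRuns]
    | cons b t =>
      have hm1 : 1 ≤ (b :: t).length := by simp
      have hrest : ∀ y ∈ pvCuts (b :: t) ++ [(b :: t).length], 1 ≤ y := by
        intro y hy
        rcases List.mem_append.mp hy with hy | hy
        · exact pvCuts_ge_one _ y hy
        · simp at hy; omega
      have hlen : (a :: b :: t).length = (b :: t).length + 1 := by simp
      have ih' := ih (by simp)
      rw [List.cons_append] at ih'
      rw [pvCuts_cons, hlen, List.cons_append]
      by_cases hab : a + 1 ≠ b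
      · simp only [if_pos hab, List.singleton_append, List.cons_append, List.nil_append]
        have hb : (1 : Nat) :: ((pvCuts (b :: t)).map (· + 1) ++ [(b :: t).length + 1])
            = (0 :: (pvCuts (b :: t) ++ [(b :: t).length])).map (· + 1) := by
          simp
        rw [hb]
        have hhead : (0 :: (pvCuts (b :: t) ++ [(b :: t).length])).map (· + 1)
            = 1 :: (pvCuts (b :: t) ++ [(b :: t).length]).map (· + 1) := by simp
        -- peel off the first pair (0,1), shift the remainder
        have hzip : pvPairs (a :: b :: t) (0 :: (0 :: (pvCuts (b :: t) ++ [(b :: t).length])).map (· + 1))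
            = [a, a + 1] :: pvPairs (a :: b :: t) ((0 :: (pvCuts (b :: t) ++ [(b :: t).length])).map (· + 1)) := by
          rw [hhead]
          unfold pvPairs
          simp
        rw [hzip, pairs_shift a (b :: t) _ (by simpa using hrest), ih']
        rw [specRuns, if_pos hab]
        simp
      · simp only [if_neg hab, List.nil_append]
        obtain ⟨w, ws, hw⟩ : ∃ w ws, (pvCuts (b :: t)).map (· + 1) ++ [(b :: t).length + 1]
            = (w + 1) :: ws.map (· + 1) ∧ (pvCuts (b :: t)) ++ [(b :: t).length] = w :: ws := by
          cases hc : pvCuts (b :: t) with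
          | nil => exact ⟨(b :: t).length, [], by simp, by simp⟩
          | cons c cs => exact ⟨c, cs ++ [(b :: t).length], by simp, by simp⟩
        obtain ⟨hw1, hw2⟩ := hw
        have hwge : 1 ≤ w := by
          have := hrest w (by rw [hw2]; simp)
          exact this
        have hwsge : ∀ y ∈ ws, 1 ≤ y := by
          intro y hy
          exact hrest y (by rw [hw2]; simp [hy])
        rw [hw1]
        -- first pair (0, w+1), then the shifted tail
        have hzip : pvPairs (a :: b :: t) (0 :: (w + 1) :: ws.map (· + 1))
            = [a, (a :: b :: t).getD w 0 + 1]
              :: pvPairs (a :: b :: t) ((w :: ws).map (· + 1)) := by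
          unfold pvPairs
          simp
        rw [hzip, pairs_shift a (b :: t) (w :: ws) (by simpa using hwsge)]
        have hgd : (a :: b :: t).getD w 0 = (b :: t).getD (w - 1) 0 := by
          obtain ⟨k, hk⟩ : ∃ k, w = k + 1 := ⟨w - 1, by omega⟩
          simp [hk, List.getD_cons_succ]
        have hih := ih'
        rw [hw2] at hih
        have hihzip : pvPairs (b :: t) (0 :: w :: ws)
            = [b, (b :: t).getD (w - 1) 0 + 1] :: pvPairs (b :: t) (w :: ws) := by
          unfold pvPairs
          simp
        rw [hihzip] at hih
        simp only [List.getD_cons_zero] at hih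
        obtain ⟨e, r, hbr, har⟩ := specRuns_start b a b t
        rw [hbr] at hih
        have heq : (b :: t).getD (w - 1) 0 + 1 = e ∧ pvPairs (b :: t) (w :: ws) = r := by
          have := List.cons.inj hih
          constructor
          · have := this.1
            simpa using this
          · exact this.2
        rw [specRuns, if_neg hab]
        simp only [List.getD_cons_zero]
        rw [har, hgd, heq.1, heq.2]

-- B's port equals the Nat-level two-pass construction on a nonempty list
theorem b_eq_pairs (xs : List Int) (h : xs ≠ []) :
    extract_span_py_alt xs = pvPairs xs (0 :: pvCuts xs ++ [xs.length]) := by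
  have hlen1 : 1 ≤ xs.length := List.length_pos_iff.mpr h
  simp only [extract_span_py_alt]
  have hn1 : ((xs.length : Int) - 1) = ((xs.length - 1 : Nat) : Int) := by omega
  have hfilter : (List.range (xs.length - 1)).filter
      (fun i : Nat => decide (PySem.List.pyGetD xs (i : Int) 0 + 1 ≠ PySem.List.pyGetD xs ((i : Int) + 1) 0))
      = (List.range (xs.length - 1)).filter
      (fun i : Nat => decide (xs.getD i 0 + 1 ≠ xs.getD (i + 1) 0)) := by
    apply List.filter_congr
    intro i _
    have hcast : ((i : Int) + 1) = ((i + 1 : Nat) : Int) := by push_cast; ring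
    rw [hcast, PySem.List.pyGetD_natCast, PySem.List.pyGetD_natCast]
  have hB : [(0 : Int)] ++ ((PySem.List.pyRange 0 ((xs.length : Int) - 1) 1).filter
        (fun i => decide (PySem.List.pyGetD xs i 0 + 1 ≠ PySem.List.pyGetD xs (i + 1) 0))).map (· + 1)
      ++ [(xs.length : Int)]
      = (0 :: pvCuts xs ++ [xs.length]).map (fun k : Nat => (k : Int)) := by
    rw [hn1, pvRange_filter, hfilter]
    simp only [pvCuts, List.map_map, List.map_append, List.map_cons, List.map_nil,
      List.cons_append, List.nil_append, List.singleton_append]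
    congr 1
  rw [hB]
  have hlb : (((0 :: pvCuts xs ++ [xs.length]).map (fun k : Nat => (k : Int))).length : Int) - 1
      = (((0 :: pvCuts xs ++ [xs.length]).length - 1 : Nat) : Int) := by
    simp [List.length_map]
  rw [hlb, pvRange_map]
  have hzf : pvPairs xs (0 :: pvCuts xs ++ [xs.length])
      = (List.range ((0 :: pvCuts xs ++ [xs.length]).length - 1)).map
        (fun j => [xs.getD ((0 :: pvCuts xs ++ [xs.length]).getD j 0) 0,
                   xs.getD ((0 :: pvCuts xs ++ [xs.length]).getD (j + 1) 0 - 1) 0 + 1]) := by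
    rw [range_pairs (fun b1 b2 => [xs.getD b1 0, xs.getD (b2 - 1) 0 + 1])
      (0 :: pvCuts xs ++ [xs.length])]
    rfl
  rw [hzf]
  apply List.map_congr_left
  intro j hj
  have hj' : j < (0 :: pvCuts xs ++ [xs.length]).length - 1 := List.mem_range.mp hj
  have hjl : j < (0 :: pvCuts xs ++ [xs.length]).length := by omega
  have hj1l : j + 1 < (0 :: pvCuts xs ++ [xs.length]).length := by omega
  have hget : ∀ (k : Nat), (hk : k < (0 :: pvCuts xs ++ [xs.length]).length) →
      PySem.List.pyGetD ((0 :: pvCuts xs ++ [xs.length]).map (fun k : Nat => (k : Int))) (k : Int) 0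
      = (((0 :: pvCuts xs ++ [xs.length]).getD k 0 : Nat) : Int) := by
    intro k hk
    rw [PySem.List.pyGetD_natCast,
      List.getD_eq_getElem _ _ (by simpa using hk), List.getElem_map,
      List.getD_eq_getElem _ _ hk]
  have hc1 : 1 ≤ (0 :: pvCuts xs ++ [xs.length]).getD (j + 1) 0 := by
    have hsh : (0 :: pvCuts xs ++ [xs.length]).getD (j + 1) 0
        = (pvCuts xs ++ [xs.length]).getD j 0 := by
      rw [List.cons_append, List.getD_cons_succ]
    rw [hsh]
    have hjm : j < (pvCuts xs ++ [xs.length]).length := by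
      simp only [List.cons_append, List.length_cons] at hj1l
      omega
    rw [List.getD_eq_getElem _ _ hjm]
    have hmem : (pvCuts xs ++ [xs.length])[j] ∈ pvCuts xs ++ [xs.length] :=
      List.getElem_mem hjm
    rcases List.mem_append.mp hmem with hm | hm
    · exact pvCuts_ge_one xs _ hm
    · simp at hm; omega
  have hcast1 : ((j : Int) + 1) = ((j + 1 : Nat) : Int) := by push_cast; ring
  rw [hget j hjl, hcast1, hget (j + 1) hj1l]
  have hsub : ((((0 :: pvCuts xs ++ [xs.length]).getD (j + 1) 0 : Nat)) : Int) - 1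
      = ((((0 :: pvCuts xs ++ [xs.length]).getD (j + 1) 0 : Nat) - 1 : Nat) : Int) := by
    omega
  rw [hsub]
  simp [PySem.List.pyGetD_natCast]

-- ===== VERDICT (by name: the statement is the Claim_ definition above) =====
theorem extract_span_py_spec : Claim_equal_extract_span_py := by
  intro spans _ hpre
  unfold Spec_extract_span_py
  cases spans with
  | nil => exact absurd rfl hpre
  | cons s t =>
    rw [a_eq_spec, b_eq_pairs _ (by simp), pairs_eq_specRuns _ (by simp)]
    simp
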